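-- pv_equiv track=rewrite | github.com/rodolfocasan/scripts | Python/filtrado_selectivo_conjuntos.py | generar_subconjuntos_filtrado_progresivo
-- ===== SOURCE A (Python) =====
-- def generar_subconjuntos_filtrado_progresivo(limite_inferior, limite_superior):
--     """
--     Genera subconjuntos para el Reconstructor de Elementos por Filtrado Progresivo de Conjuntos
--     para un rango personalizado de índices enteros.
--
--     Argumentos:
--         limite_inferior (int): El índice entero más pequeño del rango.
--         limite_superior (int): El índice entero más grande del rango.
--
--     Retorna:
--         list: Lista de listas, donde cada lista contiene índices que tienen un bit específico activado en su representación posicional ajustada al rango.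
--     """
--     # Asegurar que los límites sean enteros
--     limite_inferior = int(limite_inferior)
--     limite_superior = int(limite_superior)
--
--     # Calcular el número de elementos en el rango (tamaño del dominio)
--     num_puntos = limite_superior - limite_inferior + 1  # tamaño del conjunto discreto
--     num_bits = 0
--
--     temp = num_puntos - 1  # para determinar cuántos bits son necesarios
--
--     # Determinar cuántos bits se necesitan para cubrir todas las posiciones
--     while temp > 0:
--         temp >>= 1  # desplazar bits a la derecha: equivalente a dividir entre 2
--         num_bits += 1  # incrementar contador de bits
--
--     # Inicializar lista de subconjuntos, uno por cada posición de bit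
--     subconjuntos = []
--     for _ in range(num_bits):
--         subconjuntos.append([])  # cada subconjunto agrupa índices con bit i activo
--
--     # Iterar sobre cada índice en el rango y asignarlo a subconjuntos según bits activos
--     for indice in range(limite_inferior, limite_superior + 1):
--         indice_ajustado = indice - limite_inferior  # mapear rango a 0..(num_puntos-1)
--         for i in range(num_bits):
--
--             # Verificar si el bit i está activo en la representación de indice_ajustado
--             if indice_ajustado & (1 << i):  # operación AND para comprobar la presencia del bit
--                 subconjuntos[i].append(indice)
--
--     # Filtrar subconjuntos vacíos: no aportan información
--     resultado = []
--     for s in subconjuntos: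
--
--         # Si el subconjunto no está vacío lo agregamos al resultado
--         if len(s) > 0:
--             resultado.append(s)
--     return resultado  # devolver lista de subconjuntos relevantes
-- ===== SOURCE B (Python) =====
-- def generar_subconjuntos_filtrado_progresivo(limite_inferior, limite_superior):
--     limite_inferior = int(limite_inferior)
--     limite_superior = int(limite_superior)
--     num_puntos = limite_superior - limite_inferior + 1
--     num_bits = 0
--     temp = num_puntos - 1
--     while temp > 0:
--         temp >>= 1
--         num_bits += 1
--     resultado = []
--     for i in range(num_bits):
--         half = 1 << i
--         grupo = []
--         # values v in 0..num_puntos-1 with bit i set come in runs of length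
--         # 2^i starting at 2^i, 3*2^i, 5*2^i, ...; emit each run directly
--         for start in range(half, num_puntos, 2 * half):
--             for v in range(start, min(start + half, num_puntos)):
--                 grupo.append(limite_inferior + v)
--         if grupo:
--             resultado.append(grupo)
--     return resultado
-- ===== Notes on version B (the rewrite author's own statement) =====
-- stated objective: faster
-- what changed: Instead of testing every bit of every adjusted index (per-index inner bit loop with a bit test per (index,bit) pair), B generates each bit-group directly as arithmetic runs: values with bit i set occur in contiguous blocks of length 2^i starting at odd multiples of 2^i, so each group is emitted by strided block enumeration with no bit tests at all.
import Mathlib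
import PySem

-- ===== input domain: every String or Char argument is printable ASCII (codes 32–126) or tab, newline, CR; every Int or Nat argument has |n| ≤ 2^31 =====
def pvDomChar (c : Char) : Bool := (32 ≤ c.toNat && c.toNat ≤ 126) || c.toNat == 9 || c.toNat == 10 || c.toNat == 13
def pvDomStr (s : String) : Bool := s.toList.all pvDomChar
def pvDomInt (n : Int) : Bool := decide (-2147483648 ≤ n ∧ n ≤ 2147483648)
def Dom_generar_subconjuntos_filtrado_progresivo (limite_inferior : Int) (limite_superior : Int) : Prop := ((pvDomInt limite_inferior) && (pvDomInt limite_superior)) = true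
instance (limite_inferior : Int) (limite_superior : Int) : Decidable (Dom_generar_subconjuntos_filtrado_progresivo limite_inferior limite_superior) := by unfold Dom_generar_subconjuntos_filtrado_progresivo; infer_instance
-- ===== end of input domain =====

-- B replaces A's per-index inner bit-test loop by direct strided generation of each bit-group
-- as arithmetic runs of consecutive values (objective: faster by a constant factor — no per-element bit tests).

-- ===== PORT A =====
-- shared helper (identical code in Source A and Source B): 'while temp > 0: temp >>= 1; num_bits += 1'
def pyNumBits (t : Int) : Int :=
  if 0 < t then pyNumBits (t >>> (1 : Nat)) + 1 else 0
termination_by t.toNat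
decreasing_by simp [Int.shiftRight_eq_div_pow]; omega

def generar_subconjuntos_filtrado_progresivo (limite_inferior : Int) (limite_superior : Int) : List (List Int) :=
  let num_puntos := limite_superior - limite_inferior + 1
  let num_bits := pyNumBits (num_puntos - 1)
  let subconjuntos := (PySem.List.pyRange 0 num_bits 1).foldl (fun acc _ => acc ++ [([] : List Int)]) []
  let subconjuntos := (PySem.List.pyRange limite_inferior (limite_superior + 1) 1).foldl (fun subs indice =>
      let indice_ajustado := indice - limite_inferior
      (PySem.List.pyRange 0 num_bits 1).foldl (fun subs i =>
        -- 'indice_ajustado & (1 << i)': both operands are ≥ 0 here, so Python's '&' is Nat.land on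
        -- the magnitudes; i ≥ 0 in range(num_bits), so '1 << i' is the shift by i.toNat
        if (indice_ajustado.toNat &&& ((1 : Int) <<< (i.toNat : Int)).toNat) ≠ 0 then
          subs.modify i.toNat (fun s => s ++ [indice])
        else subs) subs) subconjuntos
  subconjuntos.foldl (fun res s => if 0 < PySem.List.len s then res ++ [s] else res) []

-- ===== PORT B =====
def generar_subconjuntos_filtrado_progresivo_alt (limite_inferior : Int) (limite_superior : Int) : List (List Int) :=
  let num_puntos := limite_superior - limite_inferior + 1
  let num_bits := pyNumBits (num_puntos - 1)
  (PySem.List.pyRange 0 num_bits 1).foldl (fun resultado i =>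
    -- i ≥ 0 in range(num_bits), so '1 << i' is the shift by i.toNat
    let half : Int := (1 : Int) <<< (i.toNat : Int)
    let grupo := (PySem.List.pyRange half num_puntos (2 * half)).foldl (fun g start =>
        (PySem.List.pyRange start (min (start + half) num_puntos) 1).foldl
          (fun g v => g ++ [limite_inferior + v]) g) []
    if grupo ≠ [] then resultado ++ [grupo] else resultado) []

-- ===== PRECONDITION & SPEC =====
def Spec_generar_subconjuntos_filtrado_progresivo (limite_inferior : Int) (limite_superior : Int) (out : List (List Int)) : Prop := out = generar_subconjuntos_filtrado_progresivo_alt limite_inferior limite_superior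
instance (limite_inferior : Int) (limite_superior : Int) (out : List (List Int)) : Decidable (Spec_generar_subconjuntos_filtrado_progresivo limite_inferior limite_superior out) := by unfold Spec_generar_subconjuntos_filtrado_progresivo; infer_instance

-- ===== CLAIM (what is proved, stated in full; the proofs are below) =====
def Claim_equal_generar_subconjuntos_filtrado_progresivo : Prop := ∀ (limite_inferior : Int) (limite_superior : Int), Dom_generar_subconjuntos_filtrado_progresivo limite_inferior limite_superior → Spec_generar_subconjuntos_filtrado_progresivo limite_inferior limite_superior (generar_subconjuntos_filtrado_progresivo limite_inferior limite_superior)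

-- ===== LEMMAS AND PROOFS =====

-- the common normal form both ports are reduced to: for bit j, the values v of the adjusted
-- range 0..n-1 whose j-th bit is set (stated as 2^j ≤ v mod 2^(j+1)), shifted back by lo
def pvGroup (lo n : Int) (j : Nat) : List Int :=
  ((PySem.List.pyRange 0 n 1).filter (fun v => decide ((2 : Int) ^ j ≤ v % (2 * 2 ^ j)))).map (fun v => lo + v)

lemma shiftl_one (k : Nat) : ((1 : Int) <<< ((k : Nat) : Int)) = 2 ^ k := by
  rw [show (1 : Int) = ((1 : Nat) : Int) from by simp, Int.shiftLeft_natCast, Nat.shiftLeft_eq]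
  push_cast
  ring

lemma pyNumBits_nonneg (t : Int) : 0 ≤ pyNumBits t := by
  suffices h : ∀ (m : Nat) (t : Int), t.toNat ≤ m → 0 ≤ pyNumBits t from h t.toNat t le_rfl
  intro m
  induction m with
  | zero =>
    intro t ht
    rw [pyNumBits]
    split
    · omega
    · omega
  | succ m ih =>
    intro t ht
    rw [pyNumBits]
    split
    · rename_i h
      have := ih (t >>> (1 : Nat)) (by simp [Int.shiftRight_eq_div_pow]; omega)
      omega
    · omega

lemma two_pow_le_of_lt_pyNumBits :
    ∀ (m : Nat) (t : Int), t.toNat ≤ m → ∀ (j : Nat), (j : Int) < pyNumBits t → (2 : Int) ^ j ≤ t := by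
  intro m
  induction m with
  | zero =>
    intro t ht j hj
    rw [pyNumBits] at hj
    split at hj
    · omega
    · omega
  | succ m ih =>
    intro t ht j hj
    rw [pyNumBits] at hj
    split at hj
    · rename_i hpos
      have hs : t >>> (1 : Nat) = t / 2 := by simp [Int.shiftRight_eq_div_pow]
      cases j with
      | zero => simpa using hpos
      | succ i =>
        have hlt : (i : Int) < pyNumBits (t >>> (1 : Nat)) := by push_cast at hj ⊢; omega
        have h2 := ih (t >>> (1 : Nat)) (by rw [hs]; omega) i hlt
        rw [hs] at h2
        rw [pow_succ]
        omega
    · omega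

lemma pyRange_pos_eq_nil {a b : Int} (s : Int) (hs : 0 < s) (h : b ≤ a) :
    PySem.List.pyRange a b s = [] := by
  rw [PySem.List.pyRange_of_pos a b hs, if_neg (by omega)]
  simp

lemma pyRange_pos_cons {a b : Int} (s : Int) (hs : 0 < s) (h : a < b) :
    PySem.List.pyRange a b s = a :: PySem.List.pyRange (a + s) b s := by
  rw [PySem.List.pyRange_of_pos a b hs, PySem.List.pyRange_of_pos (a + s) b hs,
    if_pos h]
  by_cases h2 : a + s < b
  · rw [if_pos h2]
    have hq : (b - a + s - 1) / s = (b - (a + s) + s - 1) / s + 1 := by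
      have h3 := Int.add_mul_ediv_right (b - (a + s) + s - 1) 1 (by omega : s ≠ 0)
      rw [show b - a + s - 1 = b - (a + s) + s - 1 + 1 * s from by ring, h3]
    have hnn : 0 ≤ (b - (a + s) + s - 1) / s := Int.ediv_nonneg (by omega) (by omega)
    have htn : ((b - a + s - 1) / s).toNat = ((b - (a + s) + s - 1) / s).toNat + 1 := by omega
    rw [htn, List.range_succ_eq_map, List.map_cons, List.map_map]
    refine List.cons_eq_cons.mpr ⟨by simp, ?_⟩
    apply List.map_congr_left
    intro k hk
    simp only [Function.comp_apply]
    push_cast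
    ring
  · rw [if_neg h2]
    have h1 : (b - a + s - 1) / s = 1 := by
      have hle : 1 ≤ (b - a + s - 1) / s := by
        rw [Int.le_ediv_iff_mul_le hs]; omega
      have hlt : (b - a + s - 1) / s < 2 := by
        rw [Int.ediv_lt_iff_lt_mul hs]; omega
      omega
    rw [h1]
    simp

lemma mod_window {p a v : Int} (_hp : 0 < p) (hd : (2 * p) ∣ a) (h1 : a ≤ v) (h2 : v < a + 2 * p) :
    v % (2 * p) = v - a := by
  obtain ⟨k, hk⟩ := hd
  have hv : v = (v - a) + (2 * p) * k := by omega
  rw [hv, Int.add_mul_emod_self_left, Int.emod_eq_of_lt (by omega) (by omega)]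
  omega

lemma chunk (p : Int) (hp : 0 < p) :
    ∀ (m : Nat) (a n : Int), (n - a).toNat ≤ m → 0 ≤ a → (2 * p) ∣ a →
    (PySem.List.pyRange (a + p) n (2 * p)).flatMap (fun s => PySem.List.pyRange s (min (s + p) n) 1)
    = (PySem.List.pyRange a n 1).filter (fun v => decide (p ≤ v % (2 * p))) := by
  intro m
  induction m with
  | zero =>
    intro a n hm ha hd
    rw [pyRange_pos_eq_nil (2 * p) (by omega) (by omega),
      PySem.List.pyRange_one_eq_nil (by omega)]
    simp
  | succ m ih =>
    intro a n hm ha hd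
    by_cases hna : n ≤ a + p
    · rw [pyRange_pos_eq_nil (2 * p) (by omega) hna]
      symm
      rw [List.flatMap_nil, List.filter_eq_nil_iff]
      intro v hv
      rw [PySem.List.mem_pyRange_one] at hv
      rw [mod_window hp hd (by omega) (by omega)]
      simp; omega
    · rw [not_le] at hna
      rw [pyRange_pos_cons (2 * p) (by omega) (by omega), List.flatMap_cons,
        show a + p + 2 * p = (a + 2 * p) + p from by ring,
        ih (a + 2 * p) n (by omega) (by omega) (dvd_add hd dvd_rfl)]
      rw [PySem.List.pyRange_one_append a (a + p) n (by omega) (by omega),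
        PySem.List.pyRange_one_append (a + p) (min (a + 2 * p) n) n
          (by omega) (by omega),
        List.filter_append, List.filter_append]
      have hseg1 : (PySem.List.pyRange a (a + p) 1).filter (fun v => decide (p ≤ v % (2 * p))) = [] := by
        rw [List.filter_eq_nil_iff]
        intro v hv
        rw [PySem.List.mem_pyRange_one] at hv
        rw [mod_window hp hd (by omega) (by omega)]
        simp; omega
      have hseg2 : (PySem.List.pyRange (a + p) (min (a + 2 * p) n) 1).filter
          (fun v => decide (p ≤ v % (2 * p))) = PySem.List.pyRange (a + p) (min (a + 2 * p) n) 1 := by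
        rw [List.filter_eq_self]
        intro v hv
        rw [PySem.List.mem_pyRange_one] at hv
        rw [mod_window hp hd (by omega) (by omega)]
        simp; omega
      have hseg3 : (PySem.List.pyRange (min (a + 2 * p) n) n 1).filter (fun v => decide (p ≤ v % (2 * p)))
          = (PySem.List.pyRange (a + 2 * p) n 1).filter (fun v => decide (p ≤ v % (2 * p))) := by
        by_cases hc : a + 2 * p ≤ n
        · rw [min_eq_left hc]
        · rw [min_eq_right (by omega), PySem.List.pyRange_one_eq_nil le_rfl,
            PySem.List.pyRange_one_eq_nil (by omega)]
      rw [hseg1, hseg2, hseg3]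
      rw [show min (a + p + p) n = min (a + 2 * p) n from by ring_nf]
      simp

lemma nat_bit_iff (k j : Nat) : (k &&& 2 ^ j ≠ 0) ↔ 2 ^ j ≤ k % (2 * 2 ^ j) := by
  have hP : 0 < 2 ^ j := Nat.two_pow_pos j
  rw [Nat.and_two_pow, Nat.testBit_eq_decide_div_mod_eq]
  have hmul : k % (2 * 2 ^ j) = k % (2 ^ j) + 2 ^ j * (k / 2 ^ j % 2) := by
    rw [mul_comm]; exact Nat.mod_mul
  rw [hmul]
  have hx : k % 2 ^ j < 2 ^ j := Nat.mod_lt _ hP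
  have hy : k / 2 ^ j % 2 < 2 := Nat.mod_lt _ (by omega)
  have hy2 : k / 2 ^ j % 2 = 0 ∨ k / 2 ^ j % 2 = 1 := by omega
  rcases hy2 with h | h <;> simp [h] <;> omega

lemma mapIdx_map_range {α β : Type} (n : Nat) (g : Nat → α) (f : Nat → α → β) :
    ((List.range n).map g).mapIdx f = (List.range n).map (fun j => f j (g j)) := by
  apply List.ext_getElem
  · simp
  · intro i h1 h2
    simp at h1
    simp [List.getElem_mapIdx]

lemma inner_fold (c : Int → Prop) [DecidablePred c] (x : Int) :
    ∀ (nb : Nat) (subs : List (List Int)),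
    (PySem.List.pyRange 0 (nb : Int) 1).foldl
        (fun s i => if c i then s.modify i.toNat (fun t => t ++ [x]) else s) subs
    = subs.mapIdx (fun j t => if j < nb ∧ c (j : Int) then t ++ [x] else t) := by
  intro nb
  induction nb with
  | zero =>
    intro subs
    rw [show ((0 : Nat) : Int) = 0 from rfl, PySem.List.pyRange_one_eq_nil le_rfl, List.foldl_nil]
    apply List.ext_getElem
    · simp
    · intro i h1 h2
      simp [List.getElem_mapIdx]
  | succ nb ih =>
    intro subs
    rw [show ((nb + 1 : Nat) : Int) = (nb : Int) + 1 from by push_cast; ring,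
      PySem.List.pyRange_one_succ_right (by positivity), List.foldl_append, ih,
      List.foldl_cons, List.foldl_nil]
    by_cases hc : c (nb : Int)
    · rw [if_pos hc]
      apply List.ext_getElem
      · simp
      · intro i h1 h2
        simp only [List.getElem_modify, List.getElem_mapIdx, Int.toNat_natCast]
        by_cases h : nb = i
        · subst h
          rw [if_pos rfl, if_neg (by omega), if_pos ⟨by omega, hc⟩]
        · rw [if_neg h]
          by_cases hi : i < nb ∧ c (i : Int)
          · rw [if_pos hi, if_pos ⟨by omega, hi.2⟩]
          · rw [if_neg hi, if_neg (by rintro ⟨hlt, hcc⟩; exact hi ⟨by omega, hcc⟩)]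
    · rw [if_neg hc]
      apply List.ext_getElem
      · simp
      · intro i h1 h2
        simp only [List.getElem_mapIdx]
        by_cases hi : i < nb ∧ c (i : Int)
        · rw [if_pos hi, if_pos ⟨by omega, hi.2⟩]
        · rw [if_neg hi, if_neg ?_]
          rintro ⟨hlt, hcc⟩
          rcases eq_or_ne i nb with h | h
          · exact hc (h ▸ hcc)
          · exact hi ⟨by omega, hcc⟩

lemma outer_fold (P : Int → Int → Prop) [inst : ∀ x i, Decidable (P x i)] (nb : Nat) :
    ∀ (l : List Int) (g : Nat → List Int),
    l.foldl (fun subs x =>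
        (PySem.List.pyRange 0 (nb : Int) 1).foldl
          (fun s i => if P x i then s.modify i.toNat (fun t => t ++ [x]) else s) subs)
      ((List.range nb).map g)
    = (List.range nb).map (fun j => g j ++ l.filter (fun x => decide (P x (j : Int)))) := by
  intro l
  induction l with
  | nil =>
    intro g
    simp
  | cons x l ih =>
    intro g
    rw [List.foldl_cons, inner_fold (fun i => P x i) x nb, mapIdx_map_range]
    have hstep : (List.range nb).map (fun (j : Nat) => if j < nb ∧ P x (j : Int) then g j ++ [x] else g j)
        = (List.range nb).map (fun (j : Nat) => if P x (j : Int) then g j ++ [x] else g j) := by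
      apply List.map_congr_left
      intro j hj
      rw [List.mem_range] at hj
      by_cases h : P x (j : Int)
      · rw [if_pos ⟨hj, h⟩, if_pos h]
      · rw [if_neg (fun hcon => h hcon.2), if_neg h]
    rw [hstep, ih]
    apply List.map_congr_left
    intro j hj
    rw [List.filter_cons]
    by_cases h : P x (j : Int)
    · simp [h, List.append_assoc]
    · simp [h]

lemma pvGroup_ne_nil (lo n : Int) (j : Nat) (h : (2 : Int) ^ j ≤ n - 1) :
    pvGroup lo n j ≠ [] := by
  have hP : (0 : Int) < 2 ^ j := by positivity
  apply List.ne_nil_of_mem (a := lo + 2 ^ j)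
  unfold pvGroup
  apply List.mem_map_of_mem
  rw [List.mem_filter]
  constructor
  · rw [PySem.List.mem_pyRange_one]
    omega
  · rw [Int.emod_eq_of_lt (by omega) (by omega)]
    simp

lemma toNat_shift_one (j : Nat) : (((1 : Int) <<< ((j : Nat) : Int)).toNat) = 2 ^ j := by
  rw [shiftl_one, show ((2 : Int) ^ j) = ((2 ^ j : Nat) : Int) from by push_cast; ring,
    Int.toNat_natCast]

lemma AGroup_eq (lo hi : Int) (j : Nat) :
    (PySem.List.pyRange lo (hi + 1) 1).filter
        (fun x => decide ((x - lo).toNat &&& ((1 : Int) <<< (((j : Int)).toNat : Int)).toNat ≠ 0))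
    = pvGroup lo (hi - lo + 1) j := by
  unfold pvGroup
  rw [PySem.List.pyRange_one lo (hi + 1), PySem.List.pyRange_one 0 (hi - lo + 1),
    show (hi + 1 - lo).toNat = (hi - lo + 1 - 0).toNat from by omega]
  rw [List.filter_map, List.filter_map, List.map_map]
  have hpred : ((fun x => decide ((x - lo).toNat &&& ((1 : Int) <<< (((j : Int)).toNat : Int)).toNat ≠ 0)) ∘
        (fun k : Nat => lo + (k : Int)))
      = ((fun v => decide ((2 : Int) ^ j ≤ v % (2 * 2 ^ j))) ∘ (fun k : Nat => 0 + (k : Int))) := by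
    funext k
    simp only [Function.comp_apply, Int.toNat_natCast, toNat_shift_one, zero_add,
      show lo + (k : Int) - lo = (k : Int) from by ring]
    simp only [decide_eq_decide]
    rw [show ((2 : Int) * 2 ^ j) = ((2 * 2 ^ j : Nat) : Int) from by push_cast; ring,
      show ((k : Int) % ((2 * 2 ^ j : Nat) : Int)) = (((k % (2 * 2 ^ j) : Nat)) : Int) from by
        push_cast; ring,
      show ((2 : Int) ^ j) = ((2 ^ j : Nat) : Int) from by push_cast; ring,
      Nat.cast_le]
    exact nat_bit_iff k j
  rw [hpred]
  apply List.map_congr_left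
  intro k hk
  simp

lemma grupo_eq (lo n : Int) (i : Int) :
    (PySem.List.pyRange ((1 : Int) <<< (i.toNat : Int)) n (2 * ((1 : Int) <<< (i.toNat : Int)))).foldl
      (fun g start => (PySem.List.pyRange start (min (start + ((1 : Int) <<< (i.toNat : Int))) n) 1).foldl
        (fun g v => g ++ [lo + v]) g) []
    = pvGroup lo n i.toNat := by
  rw [shiftl_one]
  have hstep : (fun (g : List Int) (start : Int) =>
        (PySem.List.pyRange start (min (start + 2 ^ i.toNat) n) 1).foldl (fun g v => g ++ [lo + v]) g)
      = fun (g : List Int) (start : Int) =>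
        g ++ (PySem.List.pyRange start (min (start + 2 ^ i.toNat) n) 1).map (fun v => lo + v) := by
    funext g start
    rw [PySem.List.foldl_append_singleton_eq_map]
  rw [hstep, PySem.List.foldl_append_eq_flatMap, List.nil_append, ← List.map_flatMap]
  have hch := chunk ((2 : Int) ^ i.toNat) (by positivity) n.toNat 0 n (by omega) le_rfl (dvd_zero _)
  simp only [zero_add] at hch
  rw [hch]
  rfl

theorem A_eq (lo hi : Int) :
    generar_subconjuntos_filtrado_progresivo lo hi
    = (List.range (pyNumBits (hi - lo + 1 - 1)).toNat).map (pvGroup lo (hi - lo + 1)) := by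
  have h0 : 0 ≤ pyNumBits (hi - lo + 1 - 1) := pyNumBits_nonneg _
  simp only [generar_subconjuntos_filtrado_progresivo]
  rw [← Int.toNat_of_nonneg h0]
  simp only [Int.toNat_natCast]
  rw [PySem.List.foldl_append_singleton_eq_map, List.nil_append]
  have hinit : (PySem.List.pyRange 0 (((pyNumBits (hi - lo + 1 - 1)).toNat : Nat) : Int) 1).map
        (fun _ => ([] : List Int))
      = (List.range (pyNumBits (hi - lo + 1 - 1)).toNat).map (fun _ => ([] : List Int)) := by
    rw [PySem.List.pyRange_one]
    simp only [sub_zero, Int.toNat_natCast, List.map_map]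
    apply List.map_congr_left
    intro k hk
    rfl
  rw [hinit]
  simp only [outer_fold (fun x i => ((x - lo).toNat &&& ((1 : Int) <<< (i.toNat : Int)).toNat) ≠ 0)
    (pyNumBits (hi - lo + 1 - 1)).toNat (PySem.List.pyRange lo (hi + 1) 1)
    (fun _ => ([] : List Int))]
  rw [PySem.List.foldl_append_ite_eq_filter (fun s : List Int => 0 < PySem.List.len s),
    List.nil_append]
  have hmapped : (List.range (pyNumBits (hi - lo + 1 - 1)).toNat).map
        (fun (j : Nat) => ([] : List Int) ++ (PySem.List.pyRange lo (hi + 1) 1).filter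
          (fun x => decide (((x - lo).toNat &&& ((1 : Int) <<< (((j : Int)).toNat : Int)).toNat) ≠ 0)))
      = (List.range (pyNumBits (hi - lo + 1 - 1)).toNat).map (pvGroup lo (hi - lo + 1)) := by
    apply List.map_congr_left
    intro j hj
    rw [List.nil_append]
    exact AGroup_eq lo hi j
  rw [hmapped]
  have hkeep : ∀ s ∈ (List.range (pyNumBits (hi - lo + 1 - 1)).toNat).map (pvGroup lo (hi - lo + 1)),
      decide (0 < PySem.List.len s) = true := by
    intro s hs
    rw [List.mem_map] at hs
    obtain ⟨j, hj, rfl⟩ := hs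
    rw [List.mem_range] at hj
    have hb : (2 : Int) ^ j ≤ hi - lo + 1 - 1 := by
      apply two_pow_le_of_lt_pyNumBits (hi - lo + 1 - 1).toNat _ le_rfl
      omega
    have hne := pvGroup_ne_nil lo (hi - lo + 1) j hb
    have hpos : 0 < (pvGroup lo (hi - lo + 1) j).length := List.length_pos_of_ne_nil hne
    rw [decide_eq_true_iff, PySem.List.len_eq]
    exact_mod_cast hpos
  rw [List.filter_eq_self.mpr hkeep]

theorem B_eq (lo hi : Int) :
    generar_subconjuntos_filtrado_progresivo_alt lo hi
    = (List.range (pyNumBits (hi - lo + 1 - 1)).toNat).map (pvGroup lo (hi - lo + 1)) := by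
  have h0 : 0 ≤ pyNumBits (hi - lo + 1 - 1) := pyNumBits_nonneg _
  simp only [generar_subconjuntos_filtrado_progresivo_alt]
  rw [← Int.toNat_of_nonneg h0]
  simp only [Int.toNat_natCast]
  simp only [PySem.List.foldl_append_ite
    (fun i : Int => (PySem.List.pyRange ((1 : Int) <<< (i.toNat : Int)) (hi - lo + 1)
        (2 * ((1 : Int) <<< (i.toNat : Int)))).foldl
      (fun g start => (PySem.List.pyRange start (min (start + ((1 : Int) <<< (i.toNat : Int))) (hi - lo + 1)) 1).foldl
        (fun g v => g ++ [lo + v]) g) [] ≠ [])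
    (fun i : Int => (PySem.List.pyRange ((1 : Int) <<< (i.toNat : Int)) (hi - lo + 1)
        (2 * ((1 : Int) <<< (i.toNat : Int)))).foldl
      (fun g start => (PySem.List.pyRange start (min (start + ((1 : Int) <<< (i.toNat : Int))) (hi - lo + 1)) 1).foldl
        (fun g v => g ++ [lo + v]) g) [])]
  rw [List.nil_append]
  simp only [grupo_eq lo (hi - lo + 1)]
  have hkeep : ∀ i ∈ PySem.List.pyRange 0 (((pyNumBits (hi - lo + 1 - 1)).toNat : Nat) : Int) 1,
      decide (pvGroup lo (hi - lo + 1) i.toNat ≠ []) = true := by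
    intro i hi2
    rw [PySem.List.mem_pyRange_one] at hi2
    have hb : (2 : Int) ^ i.toNat ≤ hi - lo + 1 - 1 := by
      apply two_pow_le_of_lt_pyNumBits (hi - lo + 1 - 1).toNat _ le_rfl
      omega
    have hne := pvGroup_ne_nil lo (hi - lo + 1) i.toNat hb
    simpa using hne
  rw [List.filter_eq_self.mpr hkeep]
  rw [PySem.List.pyRange_one 0, List.map_map]
  simp only [sub_zero, Int.toNat_natCast]
  apply List.map_congr_left
  intro k hk
  simp only [Function.comp_apply, zero_add, Int.toNat_natCast]

-- ===== VERDICT (by name: the statement is the Claim_ definition above) =====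
theorem generar_subconjuntos_filtrado_progresivo_spec : Claim_equal_generar_subconjuntos_filtrado_progresivo := by
  intro lo hi _
  unfold Spec_generar_subconjuntos_filtrado_progresivo
  rw [A_eq, B_eq]
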